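-- pv_equiv track=rewrite | github.com/aqwmx11/Python_Project | MA algo for 10-year T-note/MA_algo.py | valueGenerator
-- ===== SOURCE A (Python) =====
-- def valueGenerator(buyList,sellList,priceList):
-- 	myPosition=0
-- 	totalDay=len(priceList)
-- 	#Because there is no trading in the first day, we have no asset and cash
-- 	assetList=[0]
-- 	#Assume we have the money to buy one share
-- 	cashList=[priceList[0]]
-- 	valueList=[priceList[0]]
-- 	for i in range(1,totalDay):
--
-- 		#Check whether we need to trade today
-- 		#Note we observe the trading signal at the end of a trading day
-- 		#Therefore we can only execute corresponding trading in the next day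
--
-- 		if (i-1) in buyList:
-- 			cashList.append(cashList[i-1]-priceList[i])
-- 			myPosition+=1
--
-- 		elif (i-1) in sellList:
-- 			cashList.append(cashList[i-1]+priceList[i])
-- 			myPosition-=1
--
-- 		else:
-- 			cashList.append(cashList[i-1])
--
-- 		#assetList is rather easy to compute, just position*price
-- 		assetList.append(myPosition*priceList[i])
--
-- 		#valueList is the sum of assetList and cashList
-- 		valueList.append(assetList[i]+cashList[i])
--
-- 	return valueList
-- ===== SOURCE B (Python) =====
-- def valueGenerator(buyList, sellList, priceList):
--     # Mark-to-market identity: daily P&L is (shares held overnight) * (price change).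
--     # No cash/asset bookkeeping at all: value[0] = priceList[0] and
--     # value[i] = value[i-1] + pos_{i-1} * (priceList[i] - priceList[i-1]),
--     # where pos is updated AFTER marking, by the signal observed on day i-1
--     # (buy wins over sell). This equals A's asset+cash because each trade at
--     # day i moves cash by -trade*price[i] and holdings by +trade*price[i].
--     buys = set(buyList)
--     sells = set(sellList)
--     valueList = [priceList[0]]
--     pos = 0
--     for i in range(1, len(priceList)):
--         valueList.append(valueList[-1] + pos * (priceList[i] - priceList[i - 1]))
--         if i - 1 in buys:
--             pos += 1
--         elif i - 1 in sells:
--             pos -= 1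
--     return valueList
-- ===== Notes on version B (the rewrite author's own statement) =====
-- stated objective: faster
-- what changed: Replaces A's cash/asset ledger simulation (three parallel lists, cash running sum with signal-dependent branches, value = asset+cash) by the mark-to-market identity: value[i] = value[i-1] + position*(price[i]-price[i-1]) with a single integer position accumulator and set-based signal lookup, tracking no cash or asset lists at all.
import Mathlib
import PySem

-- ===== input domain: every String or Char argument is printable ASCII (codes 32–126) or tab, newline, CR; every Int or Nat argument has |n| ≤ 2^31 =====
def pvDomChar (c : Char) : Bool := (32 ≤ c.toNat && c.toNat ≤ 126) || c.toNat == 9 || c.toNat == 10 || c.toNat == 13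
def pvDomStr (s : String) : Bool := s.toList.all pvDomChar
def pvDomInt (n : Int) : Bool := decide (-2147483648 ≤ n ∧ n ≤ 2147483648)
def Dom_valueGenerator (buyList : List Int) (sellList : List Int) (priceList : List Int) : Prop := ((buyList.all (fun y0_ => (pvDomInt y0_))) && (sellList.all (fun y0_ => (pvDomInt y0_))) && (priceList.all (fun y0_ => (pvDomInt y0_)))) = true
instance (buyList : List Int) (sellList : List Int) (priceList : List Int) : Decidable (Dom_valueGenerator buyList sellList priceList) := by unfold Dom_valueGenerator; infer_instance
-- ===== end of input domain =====

-- B replaces A's cash/asset ledger by the mark-to-market identity value[i]=value[i-1]+pos*(price[i]-price[i-1]); return value only, no mutation.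

-- ===== PORT A =====
-- literal transliteration of A's fused loop; state = (myPosition, assetList, cashList, valueList)
def valueGenerator (buyList : List Int) (sellList : List Int) (priceList : List Int) : List Int :=
  let totalDay : Int := priceList.length
  let st :=
    (PySem.List.pyRange 1 totalDay 1).foldl
      (fun (st : Int × List Int × List Int × List Int) i =>
        let myPosition := st.1
        let assetList := st.2.1
        let cashList := st.2.2.1
        let valueList := st.2.2.2
        let (myPosition, cashList) :=
          if (i - 1) ∈ buyList then
            (myPosition + 1,
             cashList ++ [PySem.List.pyGetD cashList (i - 1) 0 - PySem.List.pyGetD priceList i 0])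
          else if (i - 1) ∈ sellList then
            (myPosition - 1,
             cashList ++ [PySem.List.pyGetD cashList (i - 1) 0 + PySem.List.pyGetD priceList i 0])
          else
            (myPosition, cashList ++ [PySem.List.pyGetD cashList (i - 1) 0])
        let assetList := assetList ++ [myPosition * PySem.List.pyGetD priceList i 0]
        let valueList := valueList ++
          [PySem.List.pyGetD assetList i 0 + PySem.List.pyGetD cashList i 0]
        (myPosition, assetList, cashList, valueList))
      (0, [(0 : Int)], [PySem.List.pyGetD priceList 0 0], [PySem.List.pyGetD priceList 0 0])
  st.2.2.2

-- ===== PORT B =====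
-- transliteration of Source B: valueList[-1] + pos*(price[i]-price[i-1]), pos updated after marking
def valueGenerator_alt (buyList : List Int) (sellList : List Int) (priceList : List Int) : List Int :=
  let buys : PySem.Set Int := PySem.Set.ofList buyList
  let sells : PySem.Set Int := PySem.Set.ofList sellList
  let st :=
    (PySem.List.pyRange 1 priceList.length 1).foldl
      (fun (st : List Int × Int) i =>
        let valueList := st.1
        let pos := st.2
        let valueList := valueList ++
          [PySem.List.pyGetD valueList (-1) 0 +
            pos * (PySem.List.pyGetD priceList i 0 - PySem.List.pyGetD priceList (i - 1) 0)]
        let pos :=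
          if PySem.Set.contains buys (i - 1) then pos + 1
          else if PySem.Set.contains sells (i - 1) then pos - 1
          else pos
        (valueList, pos))
      ([PySem.List.pyGetD priceList 0 0], 0)
  st.1

-- ===== PRECONDITION & SPEC =====
-- Pre_ excludes only the empty priceList, on which both A and B raise IndexError (priceList[0]).
def Pre_valueGenerator (buyList : List Int) (sellList : List Int) (priceList : List Int) : Prop :=
  priceList ≠ []
instance (buyList : List Int) (sellList : List Int) (priceList : List Int) : Decidable (Pre_valueGenerator buyList sellList priceList) := by unfold Pre_valueGenerator; infer_instance

def pvWitness_valueGenerator : List Int × List Int × List Int := ([0], [1], [5, 3, 4])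

def Spec_valueGenerator (buyList : List Int) (sellList : List Int) (priceList : List Int) (out : List Int) : Prop := out = valueGenerator_alt buyList sellList priceList
instance (buyList : List Int) (sellList : List Int) (priceList : List Int) (out : List Int) : Decidable (Spec_valueGenerator buyList sellList priceList out) := by unfold Spec_valueGenerator; infer_instance

-- ===== CLAIM =====
def Claim_equal_valueGenerator : Prop := ∀ (buyList : List Int) (sellList : List Int) (priceList : List Int), Dom_valueGenerator buyList sellList priceList → Pre_valueGenerator buyList sellList priceList → Spec_valueGenerator buyList sellList priceList (valueGenerator buyList sellList priceList)

-- ===== LEMMAS AND PROOFS =====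

-- trade executed on day i (the signal observed on day i-1); 0 outside any signal
def pvTrade (b s : List Int) (i : Int) : Int :=
  if (i - 1) ∈ b then 1 else if (i - 1) ∈ s then -1 else 0

-- closed-form position after day k
def pvP (b s : List Int) : Nat → Int
  | 0 => 0
  | k + 1 => pvP b s k + pvTrade b s ((k : Int) + 1)

-- closed-form cash after day k
def pvC (b s price : List Int) : Nat → Int
  | 0 => PySem.List.pyGetD price 0 0
  | k + 1 => pvC b s price k - pvTrade b s ((k : Int) + 1) * PySem.List.pyGetD price ((k : Int) + 1) 0

-- closed-form portfolio value on day k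
def pvV (b s price : List Int) (k : Nat) : Int :=
  pvP b s k * PySem.List.pyGetD price (k : Int) 0 + pvC b s price k

theorem pvGetD_mapRange_last (g : Nat → Int) (k : Nat) :
    PySem.List.pyGetD ((List.range (k + 1)).map g) ((k : Int)) 0 = g k := by
  rw [PySem.List.pyGetD_natCast, PySem.List.getD_map_range _ _ _ _ (Nat.lt_succ_self k)]

theorem pvGetD_append_last (l : List Int) (x : Int) (k : Nat) (hl : l.length = k + 1) :
    PySem.List.pyGetD (l ++ [x]) ((k : Int) + 1) 0 = x := by
  rw [show ((k : Int) + 1) = ((k + 1 : Nat) : Int) from by push_cast; ring,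
    PySem.List.pyGetD_natCast]
  simp [List.getD_eq_getElem?_getD, hl]

-- A loop invariant: state after processing days 1..k
theorem pvA_inv (b s price : List Int) (k : Nat) :
    (PySem.List.pyRange 1 (1 + (k : Int))).foldl
      (fun (st : Int × List Int × List Int × List Int) i =>
        let myPosition := st.1
        let assetList := st.2.1
        let cashList := st.2.2.1
        let valueList := st.2.2.2
        let (myPosition, cashList) :=
          if (i - 1) ∈ b then
            (myPosition + 1,
             cashList ++ [PySem.List.pyGetD cashList (i - 1) 0 - PySem.List.pyGetD price i 0])
          else if (i - 1) ∈ s then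
            (myPosition - 1,
             cashList ++ [PySem.List.pyGetD cashList (i - 1) 0 + PySem.List.pyGetD price i 0])
          else
            (myPosition, cashList ++ [PySem.List.pyGetD cashList (i - 1) 0])
        let assetList := assetList ++ [myPosition * PySem.List.pyGetD price i 0]
        let valueList := valueList ++
          [PySem.List.pyGetD assetList i 0 + PySem.List.pyGetD cashList i 0]
        (myPosition, assetList, cashList, valueList))
      (0, [(0 : Int)], [PySem.List.pyGetD price 0 0], [PySem.List.pyGetD price 0 0]) =
    (pvP b s k,
     (List.range (k + 1)).map (fun j => pvP b s j * PySem.List.pyGetD price (j : Int) 0),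
     (List.range (k + 1)).map (pvC b s price),
     (List.range (k + 1)).map (pvV b s price)) := by
  induction k with
  | zero =>
    simp [pvP, pvC, pvV]
  | succ k ih =>
    have h : (1 : Int) + ((k : Nat) + 1 : Nat) = (1 + (k : Int)) + 1 := by push_cast; ring
    rw [h, PySem.List.pyRange_one_succ_right (by omega), List.foldl_append, ih]
    simp only [List.foldl_cons, List.foldl_nil]
    have e1 : (1 : Int) + (k : Int) - 1 = (k : Int) := by ring
    have e2 : (1 : Int) + (k : Int) = (k : Int) + 1 := by ring
    rw [e1, e2, pvGetD_mapRange_last (pvC b s price) k]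
    by_cases hb : ((k : Int)) ∈ b
    · simp only [if_pos hb]
      rw [pvGetD_append_last _ _ k (by simp), pvGetD_append_last _ _ k (by simp)]
      have hP : pvP b s (k + 1) = pvP b s k + 1 := by simp [pvP, pvTrade, hb]
      have hC : pvC b s price (k + 1) =
          pvC b s price k - PySem.List.pyGetD price ((k : Int) + 1) 0 := by
        simp [pvC, pvTrade, hb]
      rw [List.range_succ (n := k + 1)]
      simp only [List.map_append, List.map_cons, List.map_nil, pvV, Prod.mk.injEq]
      push_cast
      exact ⟨by rw [hP], by rw [hP], by rw [hC], by rw [hP, hC]⟩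
    · by_cases hs : ((k : Int)) ∈ s
      · simp only [if_neg hb, if_pos hs]
        rw [pvGetD_append_last _ _ k (by simp), pvGetD_append_last _ _ k (by simp)]
        have hP : pvP b s (k + 1) = pvP b s k - 1 := by
          simp [pvP, pvTrade, hb, hs]
          ring
        have hC : pvC b s price (k + 1) =
            pvC b s price k + PySem.List.pyGetD price ((k : Int) + 1) 0 := by
          simp [pvC, pvTrade, hb, hs]
        rw [List.range_succ (n := k + 1)]
        simp only [List.map_append, List.map_cons, List.map_nil, pvV, Prod.mk.injEq]
        push_cast
        exact ⟨by rw [hP], by rw [hP], by rw [hC], by rw [hP, hC]⟩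
      · simp only [if_neg hb, if_neg hs]
        rw [pvGetD_append_last _ _ k (by simp), pvGetD_append_last _ _ k (by simp)]
        have hP : pvP b s (k + 1) = pvP b s k := by simp [pvP, pvTrade, hb, hs]
        have hC : pvC b s price (k + 1) = pvC b s price k := by
          simp [pvC, pvTrade, hb, hs]
        rw [List.range_succ (n := k + 1)]
        simp only [List.map_append, List.map_cons, List.map_nil, pvV, Prod.mk.injEq]
        push_cast
        exact ⟨by rw [hP], by rw [hP], by rw [hC], by rw [hP, hC]⟩

-- the mark-to-market identity B relies on: daily P&L = overnight position * price change
theorem pvV_succ (b s price : List Int) (k : Nat) :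
    pvV b s price (k + 1) =
      pvV b s price k +
        pvP b s k * (PySem.List.pyGetD price ((k : Int) + 1) 0 - PySem.List.pyGetD price (k : Int) 0) := by
  have hc : ((k + 1 : Nat) : Int) = (k : Int) + 1 := by push_cast; ring
  simp only [pvV, pvP, pvC, hc]
  ring

-- B loop invariant: state after processing days 1..k
theorem pvB_inv (b s price : List Int) (k : Nat) :
    (PySem.List.pyRange 1 (1 + (k : Int))).foldl
      (fun (st : List Int × Int) i =>
        let valueList := st.1
        let pos := st.2
        let valueList := valueList ++
          [PySem.List.pyGetD valueList (-1) 0 +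
            pos * (PySem.List.pyGetD price i 0 - PySem.List.pyGetD price (i - 1) 0)]
        let pos :=
          if PySem.Set.contains (PySem.Set.ofList b) (i - 1) then pos + 1
          else if PySem.Set.contains (PySem.Set.ofList s) (i - 1) then pos - 1
          else pos
        (valueList, pos))
      ([PySem.List.pyGetD price 0 0], 0) =
    ((List.range (k + 1)).map (pvV b s price), pvP b s k) := by
  induction k with
  | zero => simp [pvV, pvP, pvC]
  | succ k ih =>
    have h : (1 : Int) + ((k : Nat) + 1 : Nat) = (1 + (k : Int)) + 1 := by push_cast; ring
    rw [h, PySem.List.pyRange_one_succ_right (by omega), List.foldl_append, ih]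
    simp only [List.foldl_cons, List.foldl_nil]
    have e1 : (1 : Int) + (k : Int) - 1 = (k : Int) := by ring
    have e2 : (1 : Int) + (k : Int) = (k : Int) + 1 := by ring
    rw [e1, e2]
    have hlast : PySem.List.pyGetD ((List.range (k + 1)).map (pvV b s price)) (-1) 0
        = pvV b s price k := by
      rw [List.range_succ, List.map_append]
      simp [PySem.List.pyGetD_neg_one_append_singleton]
    rw [hlast, Prod.mk.injEq]
    constructor
    · rw [← pvV_succ, List.range_succ (n := k + 1), List.map_append]
      simp
    · by_cases hb : ((k : Int)) ∈ b
      · simp [PySem.Set.mem_ofList, hb, pvP, pvTrade]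
      · by_cases hs : ((k : Int)) ∈ s
        · simp [PySem.Set.mem_ofList, hb, hs, pvP, pvTrade]
          ring
        · simp [PySem.Set.mem_ofList, hb, hs, pvP, pvTrade]

theorem pvA_eq (b s price : List Int) (k : Nat) (h : price.length = k + 1) :
    valueGenerator b s price = (List.range (k + 1)).map (pvV b s price) := by
  unfold valueGenerator
  simp only [h]
  rw [show ((k + 1 : Nat) : Int) = 1 + (k : Int) from by push_cast; ring, pvA_inv b s price k]

theorem pvB_eq (b s price : List Int) (k : Nat) (h : price.length = k + 1) :
    valueGenerator_alt b s price = (List.range (k + 1)).map (pvV b s price) := by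
  unfold valueGenerator_alt
  simp only [h]
  rw [show ((k + 1 : Nat) : Int) = 1 + (k : Int) from by push_cast; ring, pvB_inv b s price k]

-- ===== VERDICT =====
theorem valueGenerator_spec : Claim_equal_valueGenerator := by
  intro b s price _ hpre
  unfold Spec_valueGenerator
  unfold Pre_valueGenerator at hpre
  obtain ⟨k, hk⟩ : ∃ k, price.length = k + 1 := by
    cases price with
    | nil => exact absurd rfl hpre
    | cons x xs => exact ⟨xs.length, rfl⟩
  rw [pvA_eq b s price k hk, pvB_eq b s price k hk]
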